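-- pv_equiv track=rewrite | github.com/hmmwtf/CodingTestPractice | 백준/Silver/11726. 2×n 타일링/2×n 타일링.py | count_tile
-- ===== SOURCE A (Python) =====
-- def count_tile(n):
--     tile = [0] * (n + 3)
--     tile[0] = 0
--     tile[1] = 1
--     tile[2] = 2
--
--     for i in range(3, n+1):
--         tile[i] = (tile[i-1] + tile[i-2]) % 10007
--
--     return tile[n]
-- ===== SOURCE B (Python) =====
-- M = 10007
--
--
-- def _fd(k):
--     # fast doubling: returns (F(k) % M, F(k+1) % M) with F(0)=0, F(1)=1
--     if k == 0:
--         return (0, 1)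
--     a, b = _fd(k // 2)
--     c = a * ((2 * b - a) % M) % M
--     d = (a * a + b * b) % M
--     if k % 2 == 0:
--         return (c, d)
--     return (d, (c + d) % M)
--
--
-- def count_tile(n):
--     return _fd(n + 1)[0]
-- ===== Notes on version B (the rewrite author's own statement) =====
-- stated objective: faster
-- what changed: Replaces the O(n) DP array filling with recursive fast-doubling Fibonacci mod 10007 (F(2k), F(2k+1) from F(k), F(k+1)).
-- intended difference: At n = 0 A returns its arbitrary seed 0 while B returns 1, the correct count of tilings of an empty 2x0 board (the empty tiling). — e.g. on count_tile(0): A returns 0, B returns 1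
import Mathlib
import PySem

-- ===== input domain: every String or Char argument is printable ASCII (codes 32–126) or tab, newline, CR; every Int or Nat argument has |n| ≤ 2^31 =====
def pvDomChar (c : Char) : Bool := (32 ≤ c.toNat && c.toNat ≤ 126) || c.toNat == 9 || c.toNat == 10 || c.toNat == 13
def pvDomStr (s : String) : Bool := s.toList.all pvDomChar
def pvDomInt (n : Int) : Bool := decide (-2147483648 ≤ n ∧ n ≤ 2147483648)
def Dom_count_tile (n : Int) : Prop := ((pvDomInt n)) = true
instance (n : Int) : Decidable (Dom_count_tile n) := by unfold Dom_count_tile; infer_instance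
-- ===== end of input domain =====

-- B replaces A's O(n) DP array by recursive fast-doubling Fibonacci mod 10007 (O(log n));
-- at n = 0 B returns 1 (the empty tiling) where A returns its arbitrary seed 0 (see D_ below).

-- ===== PORT A =====
-- literal transliteration of A: build tile = [0]*(n+3), seed tile[0..2], fill by the recurrence, return tile[n].
-- The Python list is ported as a Lean Array (O(1) reads/writes, like CPython's list); all indices the
-- code uses (0, 1, 2, i-1, i-2, i with 3 ≤ i ≤ n, and the final n) are nonnegative and in range whenever
-- Pre_ (0 ≤ n) holds, where Python indexing/assignment is exactly Array.getD/.setIfInBounds at .toNat.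
def count_tile (n : Int) : Int :=
  let tile : Array Int := Array.replicate (n + 3).toNat 0
  let tile := tile.setIfInBounds 0 0
  let tile := tile.setIfInBounds 1 1
  let tile := tile.setIfInBounds 2 2
  let tile := (PySem.List.pyRange 3 (n + 1) 1).foldl
    (fun tile i =>
      tile.setIfInBounds i.toNat
        (PySem.Int.mod (tile.getD (i - 1).toNat 0 + tile.getD (i - 2).toNat 0) 10007))
    tile
  tile.getD n.toNat 0

-- ===== PORT B =====
-- fast doubling: fdB k = (F(k) % 10007, F(k+1) % 10007); transliteration of _fd in Source B.
-- Source B recurses on the Python int k; under Pre_ (and at n = -1) k = n+1 ≥ 0, so Nat recursion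
-- on (n+1).toNat is exact there (for n < -1 the Python recursion does not terminate).
def fdB : Nat → Int × Int
  | 0 => (0, 1)
  | Nat.succ k =>
      let p := fdB ((k + 1) / 2)
      let a := p.1
      let b := p.2
      let c := PySem.Int.mod (a * PySem.Int.mod (2 * b - a) 10007) 10007
      let d := PySem.Int.mod (a * a + b * b) 10007
      if (k + 1) % 2 = 0 then (c, d) else (d, PySem.Int.mod (c + d) 10007)
decreasing_by exact Nat.div_lt_self (Nat.succ_pos k) (by omega)

def count_tile_alt (n : Int) : Int := (fdB (n + 1).toNat).1

-- ===== PRECONDITION & SPEC =====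
-- A raises IndexError for every n < 0 (seeding tile[0..2] in a too-short list); Pre_ excludes exactly those.
def Pre_count_tile (n : Int) : Prop := 0 ≤ n
instance (n : Int) : Decidable (Pre_count_tile n) := by unfold Pre_count_tile; infer_instance
def pvWitness_count_tile : Int := 5

-- At n = 0 A returns its arbitrary seed 0 while B returns 1, the correct count of tilings of an empty 2×0 board.
def D_count_tile (n : Int) : Prop := n = 0
instance (n : Int) : Decidable (D_count_tile n) := by unfold D_count_tile; infer_instance

def Spec_count_tile (n : Int) (out : Int) : Prop := ¬ D_count_tile n → out = count_tile_alt n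
instance (n : Int) (out : Int) : Decidable (Spec_count_tile n out) := by unfold Spec_count_tile; infer_instance

def pvDiffWitness_count_tile : Int := 0
def pvDiffWitnessOut_count_tile : Int × Int := (0, 1)

-- ===== CLAIM (what is proved, stated in full; the proofs are below) =====
def Claim_unchanged_count_tile : Prop := ∀ (n : Int), Dom_count_tile n → Pre_count_tile n → Spec_count_tile n (count_tile n)
def Claim_changed_count_tile : Prop := Dom_count_tile (pvDiffWitness_count_tile) ∧ Pre_count_tile (pvDiffWitness_count_tile) ∧ D_count_tile (pvDiffWitness_count_tile) ∧ count_tile (pvDiffWitness_count_tile) = pvDiffWitnessOut_count_tile.1 ∧ count_tile_alt (pvDiffWitness_count_tile) = pvDiffWitnessOut_count_tile.2 ∧ pvDiffWitnessOut_count_tile.1 ≠ pvDiffWitnessOut_count_tile.2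
def Claim_exact_count_tile : Prop := ∀ (n : Int), Dom_count_tile n → Pre_count_tile n → D_count_tile n → count_tile n ≠ count_tile_alt n

-- ===== LEMMAS AND PROOFS =====

theorem fdB_eq (k : Nat) : fdB k = ((Nat.fib k : Int) % 10007, (Nat.fib (k + 1) : Int) % 10007) := by
  induction k using Nat.strong_induction_on with
  | _ k ih =>
    match k with
    | 0 => simp [fdB]
    | Nat.succ k' =>
      set m := (k' + 1) / 2 with hm
      have ihm := ih m (by omega)
      rw [fdB, ← hm, ihm]
      simp only [PySem.Int.mod_eq_emod_of_pos (by norm_num : (0:Int) < 10007)]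
      set Fm : Int := (Nat.fib m : Int)
      set F1 : Int := (Nat.fib (m+1) : Int)
      have h1 : ∀ x : Int, x % 10007 ≡ x [ZMOD 10007] := fun x => Int.emod_emod_of_dvd x dvd_rfl
      have hfib2 : (Nat.fib (2*m) : Int) = Fm * (2 * F1 - Fm) := by
        have hle : Nat.fib m ≤ 2 * Nat.fib (m+1) := le_trans (Nat.fib_le_fib_succ) (by omega)
        have := Nat.fib_two_mul m
        push_cast [this, Nat.cast_sub hle]
        ring
      have hfib21 : (Nat.fib (2*m+1) : Int) = F1 * F1 + Fm * Fm := by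
        have := Nat.fib_two_mul_add_one m
        push_cast [this]
        ring
      have hc : (Fm % 10007) * ((2 * (F1 % 10007) - Fm % 10007) % 10007) % 10007
          = (Nat.fib (2*m) : Int) % 10007 := by
        rw [hfib2]
        exact ((h1 Fm).mul ((h1 _).trans (((Int.ModEq.refl 2).mul (h1 F1)).sub (h1 Fm))))
      have hd : (Fm % 10007 * (Fm % 10007) + F1 % 10007 * (F1 % 10007)) % 10007
          = (Nat.fib (2*m+1) : Int) % 10007 := by
        rw [hfib21]
        calc (Fm % 10007 * (Fm % 10007) + F1 % 10007 * (F1 % 10007)) % 10007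
            = (Fm * Fm + F1 * F1) % 10007 := ((h1 Fm).mul (h1 Fm)).add ((h1 F1).mul (h1 F1))
          _ = (F1 * F1 + Fm * Fm) % 10007 := by ring_nf
      by_cases hpar : (k' + 1) % 2 = 0
      · have h2m : k' + 1 = 2 * m := by omega
        simp only [hpar, if_true, Nat.succ_eq_add_one]
        rw [h2m]
        exact Prod.ext (by simpa using hc) (by simpa using hd)
      · have h2m : k' + 1 = 2 * m + 1 := by omega
        simp only [hpar, if_false, Nat.succ_eq_add_one]
        rw [h2m]
        refine Prod.ext (by simpa using hd) ?_
        show (_ + _) % 10007 = (Nat.fib (2*m+1+1) : Int) % 10007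
        rw [hc, hd]
        have : (Nat.fib (2*m+1+1) : Int) = (Nat.fib (2*m) : Int) + (Nat.fib (2*m+1) : Int) := by
          have := Nat.fib_add_two (n := 2*m)
          push_cast [this]; ring
        rw [this]
        exact ((h1 _).add (h1 _))

def tileBody (tile : List Int) (i : Int) : List Int :=
  PySem.List.pySetD tile i
    (PySem.Int.mod (PySem.List.pyGetD tile (i - 1) 0 + PySem.List.pyGetD tile (i - 2) 0) 10007)

def tile0 (N : Nat) : List Int := 0 :: 1 :: 2 :: List.replicate N 0

theorem tile0_eq (N : Nat) :
    ((((Array.replicate (((N : Int) + 3).toNat) (0:Int)).setIfInBounds 0 0).setIfInBounds 1 1).setIfInBounds 2 2).toList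
      = tile0 N := by
  have h3 : ((N : Int) + 3).toNat = N + 3 := by omega
  rw [h3]
  simp [Array.toList_setIfInBounds, List.replicate_succ, tile0, List.set]

def arrBody (tile : Array Int) (i : Int) : Array Int :=
  tile.setIfInBounds i.toNat
    (PySem.Int.mod (tile.getD (i - 1).toNat 0 + tile.getD (i - 2).toNat 0) 10007)

theorem arr_getD_toList (a : Array Int) (i : Nat) (d : Int) : a.getD i d = a.toList.getD i d := by
  rw [List.getD, Array.getElem?_toList, Array.getD]
  split_ifs with h
  · simp [Array.getElem?_eq_getElem h]
  · simp [Array.getElem?_eq_none_iff.mpr (show a.size ≤ i by omega)]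

theorem pyGetD_nonneg (xs : List Int) (i : Int) (d : Int) (h : 0 ≤ i) :
    PySem.List.pyGetD xs i d = xs.getD i.toNat d := by
  simp only [PySem.List.pyGetD, PySem.List.pyGet?, PySem.List.pyIdx?, if_pos h, List.getD]
  split_ifs with h2
  · simp
  · rw [List.getElem?_eq_none (by simpa using by omega)]
    simp

theorem toList_arrBody (a : Array Int) (i : Int) (hi : 3 ≤ i) :
    (arrBody a i).toList = tileBody a.toList i := by
  unfold arrBody tileBody
  rw [Array.toList_setIfInBounds, PySem.List.pySetD_of_nonneg _ _ (by omega),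
    pyGetD_nonneg _ _ _ (by omega), pyGetD_nonneg _ _ _ (by omega),
    arr_getD_toList, arr_getD_toList]

theorem fold_toList (l : List Int) (h : ∀ i ∈ l, 3 ≤ i) (a : Array Int) :
    (l.foldl arrBody a).toList = l.foldl tileBody a.toList := by
  induction l generalizing a with
  | nil => rfl
  | cons x xs ih =>
    simp only [List.foldl_cons]
    rw [ih (fun i hi => h i (by simp [hi])), toList_arrBody a x (h x (by simp))]

theorem loopA (N : Nat) (c : Nat) (hc : c + 2 ≤ N) :
    ((PySem.List.pyRange 3 (3 + (c : Int)) 1).foldl tileBody (tile0 N)).length = N + 3 ∧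
    ∀ i : Nat, 1 ≤ i → i ≤ c + 2 →
      ((PySem.List.pyRange 3 (3 + (c : Int)) 1).foldl tileBody (tile0 N)).getD i 0
        = (Nat.fib (i + 1) : Int) % 10007 := by
  induction c with
  | zero =>
    rw [PySem.List.pyRange_one_eq_nil (by omega)]
    refine ⟨by simp [tile0], ?_⟩
    intro i h1 h2
    interval_cases i
    · simp [tile0]
    · simp only [tile0]
      norm_num [show Nat.fib 3 = 2 from by decide]
  | succ c ihc =>
    have ih := ihc (by omega)
    obtain ⟨ihlen, ihval⟩ := ih
    have hrange : PySem.List.pyRange 3 (3 + ((c+1 : Nat) : Int)) 1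
        = PySem.List.pyRange 3 (3 + (c : Int)) 1 ++ [3 + (c : Int)] := by
      have : (3 + ((c+1 : Nat) : Int)) = (3 + (c : Int)) + 1 := by push_cast; ring
      rw [this, PySem.List.pyRange_one_succ_right (by omega)]
    rw [hrange, List.foldl_append]
    set T := (PySem.List.pyRange 3 (3 + (c : Int)) 1).foldl tileBody (tile0 N) with hT
    -- the two reads
    have hg1 : PySem.List.pyGetD T (3 + (c : Int) - 1) 0 = (Nat.fib (c + 3) : Int) % 10007 := by
      have : (3 + (c : Int) - 1) = ((c + 2 : Nat) : Int) := by push_cast; ring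
      rw [this, PySem.List.pyGetD_natCast]
      simpa using ihval (c + 2) (by omega) (by omega)
    have hg2 : PySem.List.pyGetD T (3 + (c : Int) - 2) 0 = (Nat.fib (c + 2) : Int) % 10007 := by
      have : (3 + (c : Int) - 2) = ((c + 1 : Nat) : Int) := by push_cast; ring
      rw [this, PySem.List.pyGetD_natCast]
      simpa using ihval (c + 1) (by omega) (by omega)
    have hval : PySem.Int.mod (PySem.List.pyGetD T (3 + (c : Int) - 1) 0
        + PySem.List.pyGetD T (3 + (c : Int) - 2) 0) 10007 = (Nat.fib (c + 4) : Int) % 10007 := by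
      rw [hg1, hg2, PySem.Int.mod_eq_emod_of_pos (by norm_num)]
      have hfib : (Nat.fib (c + 4) : Int) = (Nat.fib (c + 2) : Int) + (Nat.fib (c + 3) : Int) := by
        have := Nat.fib_add_two (n := c + 2)
        push_cast [this]; ring
      rw [hfib]
      have h1 : ∀ x : Int, x % 10007 ≡ x [ZMOD 10007] := fun x => Int.emod_emod_of_dvd x dvd_rfl
      calc ((Nat.fib (c+3) : Int) % 10007 + (Nat.fib (c+2) : Int) % 10007) % 10007
          = ((Nat.fib (c+3) : Int) + (Nat.fib (c+2) : Int)) % 10007 := (h1 _).add (h1 _)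
        _ = ((Nat.fib (c+2) : Int) + (Nat.fib (c+3) : Int)) % 10007 := by ring_nf
    have hset : tileBody T (3 + (c : Int)) = T.set (c + 3)
        ((Nat.fib (c + 4) : Int) % 10007) := by
      rw [tileBody, hval, PySem.List.pySetD_of_nonneg T _ (by omega)]
      congr 1
      omega
    simp only [List.foldl_cons, List.foldl_nil]
    rw [hset]
    refine ⟨by simp [ihlen], ?_⟩
    intro i h1 h2
    by_cases hi : i = c + 3
    · subst hi
      rw [List.getD_eq_getElem?_getD, List.getElem?_set_self (by omega), Option.getD_some]
    · have : i ≤ c + 2 := by omega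
      rw [List.getD_eq_getElem?_getD, List.getElem?_set_ne (by omega), ← List.getD_eq_getElem?_getD]
      exact ihval i h1 this

theorem count_tile_eq (N : Nat) (h : 1 ≤ N) :
    count_tile (N : Int) = (Nat.fib (N + 1) : Int) % 10007 := by
  rcases Nat.lt_or_ge N 2 with h2 | h2
  · have : N = 1 := by omega
    subst this
    decide
  · have key := loopA N (N - 2) (by omega)
    obtain ⟨_, hval⟩ := key
    have hup : (3 + ((N - 2 : Nat) : Int)) = (N : Int) + 1 := by omega
    rw [hup] at hval
    have := hval N (by omega) (by omega)
    have hexp : count_tile (N : Int) =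
        ((PySem.List.pyRange 3 ((N:Int) + 1) 1).foldl arrBody
          ((((Array.replicate (((N : Int) + 3).toNat) (0:Int)).setIfInBounds 0 0).setIfInBounds
            1 1).setIfInBounds 2 2)).getD ((N : Int)).toNat 0 := rfl
    rw [hexp, arr_getD_toList,
      fold_toList _ (fun i hi => ((PySem.List.mem_pyRange_one).mp hi).1) _, tile0_eq]
    simpa using this

-- ===== VERDICT (by name: the statement is the Claim_ definition above) =====
theorem count_tile_spec : Claim_unchanged_count_tile := by
  intro n _ hpre hd
  obtain ⟨N, rfl⟩ := Int.eq_ofNat_of_zero_le hpre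
  have hN : 1 ≤ N := by
    rcases Nat.eq_zero_or_pos N with h0 | h1
    · exact absurd (by simp [D_count_tile, h0]) hd
    · exact h1
  show count_tile (N : Int) = count_tile_alt (N : Int)
  unfold count_tile_alt
  rw [count_tile_eq N hN]
  have : ((N : Int) + 1).toNat = N + 1 := by omega
  rw [this, fdB_eq]

theorem count_tile_changed : Claim_changed_count_tile := by
  unfold Claim_changed_count_tile
  refine ⟨by decide, by decide, by decide, by decide, ?_, by decide⟩
  show (fdB 1).1 = 1
  simp [fdB]

theorem count_tile_tight : Claim_exact_count_tile := by
  intro n _ _ hd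
  unfold D_count_tile at hd
  subst hd
  have h1 : count_tile 0 = 0 := by decide
  have h2 : count_tile_alt 0 = 1 := by
    show (fdB 1).1 = 1
    simp [fdB]
  rw [h1, h2]; decide
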